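-- pv_equiv track=rewrite | github.com/zhousc11/hbnu-nlp-homework | exp2/process_data.py | tag_line
-- ===== SOURCE A (Python) =====
-- def tag_line(words, mark):
--     chars = []
--     tags = []
--     temp_word = ''
--     for word in words:
--         word = word.strip('\t ')
--         if temp_word == '':
--             bracket_pos = word.find('[')
--             w, h = word.split('/')
--             if bracket_pos == -1:
--                 if len(w) == 0:
--                     continue
--                 chars.extend(w)
--                 if h == 'ns':
--                     tags += ['s'] if len(w) == 1 else ['B'] + ['M'] * (len(w) - 2) + ['E']
--                 else:
--                     tags += ['0'] * len(w)
--             else: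
--                 w = w[bracket_pos + 1:]
--                 temp_word += w
--         else:
--             bracket_pos = word.find(']')
--             w, h = word.split('/')
--             if bracket_pos == -1:
--                 temp_word += w
--             else:
--                 w = temp_word + w
--                 h = word[bracket_pos + 1:]
--                 temp_word = ''
--                 if len(w) == 0:
--                     continue
--                 chars.extend(w)
--                 if h == 'ns':
--                     tags += ['s'] if len(w) == 1 else ['B'] + ['M'] * (len(w) - 2) + ['E']
--                 else:
--                     tags += ['0'] * len(w)
--     assert temp_word == ''
--     return chars, tags
-- ===== SOURCE B (Python) =====
-- def _tags(w, h):
--     if h != 'ns':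
--         return ['0'] * len(w)
--     if len(w) == 1:
--         return ['s']
--     return ['B'] + ['M'] * (len(w) - 2) + ['E']
--
--
-- def tag_line(words, mark):
--     # Pass 1: merge '[...]' bracket groups and collect the (word, tag) tokens.
--     tokens = []
--     acc = ''
--     for word in words:
--         word = word.strip('\t ')
--         w, h = word.split('/')
--         if acc == '':
--             p = word.find('[')
--             if p == -1:
--                 if w:
--                     tokens.append((w, h))
--             else:
--                 acc = w[p + 1:]
--         else:
--             p = word.find(']')
--             if p == -1:
--                 acc += w
--             else:
--                 tokens.append((acc + w, word[p + 1:]))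
--                 acc = ''
--     assert acc == ''
--     # Pass 2: render characters and BMES/'0' tags from the tokens.
--     chars = [c for (w, h) in tokens for c in w]
--     tags = [t for (w, h) in tokens for t in _tags(w, h)]
--     return chars, tags
-- ===== Notes on version B (the rewrite author's own statement) =====
-- stated objective: alternative
-- what changed: B replaces A's single fused loop (which interleaves bracket-group merging with chars/tags emission on a 3-part state) by a two-pass decomposition: pass 1 only merges '[...]' bracket groups into a token list, pass 2 renders the chars and the BMES/'0' tags from the tokens with a helper.
import Mathlib
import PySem

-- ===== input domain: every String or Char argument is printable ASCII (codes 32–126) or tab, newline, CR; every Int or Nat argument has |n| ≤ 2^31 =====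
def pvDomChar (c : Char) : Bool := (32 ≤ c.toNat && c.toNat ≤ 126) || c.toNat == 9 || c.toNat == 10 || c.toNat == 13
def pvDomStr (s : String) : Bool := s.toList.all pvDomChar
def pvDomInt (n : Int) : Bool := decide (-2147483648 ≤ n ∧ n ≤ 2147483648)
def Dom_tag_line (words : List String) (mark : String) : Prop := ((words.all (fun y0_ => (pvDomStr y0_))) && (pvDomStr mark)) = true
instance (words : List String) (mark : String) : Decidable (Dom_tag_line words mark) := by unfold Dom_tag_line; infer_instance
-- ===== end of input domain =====

-- B is a two-pass decomposition (pass 1 merges bracket groups into tokens, pass 2 renders chars/tags);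
-- equivalence is about the return value; Pre_ excludes the inputs on which A raises.

-- ===== PORT A =====
-- fold state: ((chars, tags), temp_word); where Python's split('/') would raise (not exactly
-- one '/'), Pre_ excludes the input and the port leaves the state unchanged.
def tagStepA (st : (List String × List String) × String) (word0 : String) : (List String × List String) × String :=
  let word := PySem.Str.stripChars word0 "\t "
  if st.2 = "" then
    let bp := PySem.Str.find word "["
    match PySem.Str.split? word "/" with
    | some [w, h] =>
      if bp = -1 then
        if PySem.Str.len w = 0 then st
        else ((st.1.1 ++ w.toList.map (fun c => String.ofList [c]),
               st.1.2 ++ (if h = "ns" then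
                            (if PySem.Str.len w = 1 then ["s"]
                             else ["B"] ++ List.replicate (PySem.Str.len w - 2).toNat "M" ++ ["E"])
                          else List.replicate (PySem.Str.len w).toNat "0")),
              st.2)
      else (st.1, st.2 ++ PySem.Str.slice w (some (bp + 1)) none)
    | _ => st
  else
    let bp := PySem.Str.find word "]"
    match PySem.Str.split? word "/" with
    | some [w, _h] =>
      if bp = -1 then (st.1, st.2 ++ w)
      else
        let w' := st.2 ++ w
        let h' := PySem.Str.slice word (some (bp + 1)) none
        if PySem.Str.len w' = 0 then (st.1, "")
        else ((st.1.1 ++ w'.toList.map (fun c => String.ofList [c]),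
               st.1.2 ++ (if h' = "ns" then
                            (if PySem.Str.len w' = 1 then ["s"]
                             else ["B"] ++ List.replicate (PySem.Str.len w' - 2).toNat "M" ++ ["E"])
                          else List.replicate (PySem.Str.len w').toNat "0")),
              "")
    | _ => st

def tag_line (words : List String) (mark : String) : List String × List String :=
  (words.foldl tagStepA (([], []), "")).1

-- ===== PORT B =====
def mkTagsB (w h : String) : List String :=
  if h = "ns" then
    (if PySem.Str.len w = 1 then ["s"]
     else ["B"] ++ List.replicate (PySem.Str.len w - 2).toNat "M" ++ ["E"])
  else List.replicate (PySem.Str.len w).toNat "0"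

def charsOfTok (t : String × String) : List String :=
  t.1.toList.map (fun c => String.ofList [c])

-- pass-1 fold state: (tokens, acc)
def tagStepB (st : List (String × String) × String) (word0 : String) : List (String × String) × String :=
  let word := PySem.Str.stripChars word0 "\t "
  match PySem.Str.split? word "/" with
  | some [w, h] =>
    if st.2 = "" then
      let p := PySem.Str.find word "["
      if p = -1 then
        if w = "" then st else (st.1 ++ [(w, h)], st.2)
      else (st.1, PySem.Str.slice w (some (p + 1)) none)
    else
      let p := PySem.Str.find word "]"
      if p = -1 then (st.1, st.2 ++ w)
      else (st.1 ++ [(st.2 ++ w, PySem.Str.slice word (some (p + 1)) none)], "")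
  | _ => st

def tag_line_alt (words : List String) (mark : String) : List String × List String :=
  let tks := (words.foldl tagStepB ([], "")).1
  (tks.flatMap charsOfTok, tks.flatMap (fun t => mkTagsB t.1 t.2))

-- ===== PRECONDITION & SPEC =====
-- bracket-state after one stripped word: whether Python's temp_word is nonempty
def openStep (st : Bool) (word : String) : Bool :=
  if st then PySem.Str.find word "]" = -1
  else
    let p := PySem.Str.find word "["
    decide (p ≠ -1 ∧ p + 1 < ((PySem.Str.split? word "/").getD [word]).headI.length)

-- Pre_ excludes exactly the inputs on which Python A raises: a stripped word without exactly
-- one '/' (ValueError from the 2-target split) or an unclosed bracket group at the end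
-- (the final assert fails).
def Pre_tag_line (words : List String) (mark : String) : Prop :=
  (∀ w ∈ words, PySem.Str.count (PySem.Str.stripChars w "\t ") "/" = 1) ∧
  (words.map (fun w => PySem.Str.stripChars w "\t ")).foldl openStep false = false
instance (words : List String) (mark : String) : Decidable (Pre_tag_line words mark) := by
  unfold Pre_tag_line; infer_instance

def pvWitness_tag_line : List String × String := (["[ab/x", "cd/y]ns", "e/ns"], "m")

def Spec_tag_line (words : List String) (mark : String) (out : List String × List String) : Prop := out = tag_line_alt words mark
instance (words : List String) (mark : String) (out : List String × List String) : Decidable (Spec_tag_line words mark out) := by unfold Spec_tag_line; infer_instance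

-- ===== CLAIM (what is proved, stated in full; the proofs are below) =====
def Claim_equal_tag_line : Prop := ∀ (words : List String) (mark : String), Dom_tag_line words mark → Pre_tag_line words mark → Spec_tag_line words mark (tag_line words mark)

-- ===== LEMMAS AND PROOFS =====
lemma len_append_ne_zero (a b : String) (h : a ≠ "") : PySem.Str.len (a ++ b) ≠ 0 := by
  simp [PySem.Str.len]
  intro hh
  have h0 : a.length = 0 := by omega
  exact h (by simpa using h0)

lemma stepAB (chars tags : List String) (acc w0 : String) :
    tagStepA ((chars, tags), acc) w0
      = ((chars ++ (tagStepB ([], acc) w0).1.flatMap charsOfTok,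
          tags ++ (tagStepB ([], acc) w0).1.flatMap (fun t => mkTagsB t.1 t.2)),
         (tagStepB ([], acc) w0).2) := by
  simp only [tagStepA, tagStepB]
  rcases hs : PySem.Str.split? (PySem.Str.stripChars w0 "\t ") "/" with _ | l
  · by_cases hacc : acc = "" <;> simp [hacc]
  · rcases l with _ | ⟨w, _ | ⟨h, _ | ⟨c, r⟩⟩⟩
    · by_cases hacc : acc = "" <;> simp [hacc]
    · by_cases hacc : acc = "" <;> simp [hacc]
    · by_cases hacc : acc = ""
      · simp only [hacc, if_pos]
        split_ifs with h1 h2 <;>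
          simp_all [charsOfTok, mkTagsB, PySem.Str.len]
      · simp only [if_neg hacc]
        split_ifs with h1 h2 <;>
          first
          | (simp_all [charsOfTok, mkTagsB, PySem.Str.len, String.length_append] <;> omega)
          | exact absurd h2 (len_append_ne_zero acc w hacc)
    · by_cases hacc : acc = "" <;> simp [hacc]

lemma stepB_shift (ts : List (String × String)) (acc : String) (w0 : String) :
    tagStepB (ts, acc) w0 = (ts ++ (tagStepB ([], acc) w0).1, (tagStepB ([], acc) w0).2) := by
  simp only [tagStepB]
  rcases hs : PySem.Str.split? (PySem.Str.stripChars w0 "\t ") "/" with _ | l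
  · simp
  · rcases l with _ | ⟨w, _ | ⟨h, _ | ⟨c, r⟩⟩⟩ <;> simp only []
    · simp
    · simp
    · by_cases hacc : acc = "" <;> split_ifs <;> simp
    · simp

lemma foldB_shift (ws : List String) (ts : List (String × String)) (acc : String) :
    List.foldl tagStepB (ts, acc) ws
      = (ts ++ (List.foldl tagStepB ([], acc) ws).1, (List.foldl tagStepB ([], acc) ws).2) := by
  induction ws generalizing ts acc with
  | nil => simp
  | cons w ws ih =>
    rcases hstep : tagStepB ([], acc) w with ⟨ts1, acc1⟩
    simp only [List.foldl_cons, stepB_shift ts acc w, hstep]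
    rw [ih, ih ts1 acc1]
    simp

lemma main_inv (ws : List String) (chars tags : List String) (acc : String) :
    List.foldl tagStepA ((chars, tags), acc) ws
      = ((chars ++ ((List.foldl tagStepB ([], acc) ws).1.flatMap charsOfTok),
          tags ++ ((List.foldl tagStepB ([], acc) ws).1.flatMap (fun t => mkTagsB t.1 t.2))),
         (List.foldl tagStepB ([], acc) ws).2) := by
  induction ws generalizing chars tags acc with
  | nil => simp
  | cons w ws ih =>
    rcases hstep : tagStepB ([], acc) w with ⟨ts1, acc1⟩
    simp only [List.foldl_cons, stepAB chars tags acc w, hstep]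
    rw [ih, foldB_shift ws ts1 acc1]
    simp

-- ===== VERDICT (by name: the statement is the Claim_ definition above) =====
theorem tag_line_spec : Claim_equal_tag_line := by
  intro words mark _ _
  unfold Spec_tag_line tag_line tag_line_alt
  rw [main_inv]
  simp
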